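-- pv_equiv track=rewrite | github.com/drblez/luaz | scripts/asmfmt.py | _normalize_operands
-- ===== SOURCE A (Python) =====
-- from typing import Iterable, List, Tuple
--
-- def _normalize_operands(text: str) -> str:
--     """
--     Normalize whitespace outside quoted strings and remove spaces around commas.
--     """
--     if not text:
--         return ""
--     out: List[str] = []
--     in_quote = False
--     pending_space = False
--     i = 0
--     while i < len(text):
--         ch = text[i]
--         if ch == "'":
--             if in_quote and i + 1 < len(text) and text[i + 1] == "'":
--                 out.append("''")
--                 i += 2
--                 continue
--             in_quote = not in_quote
--             out.append(ch)
--             i += 1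
--             continue
--         if in_quote:
--             out.append(ch)
--             i += 1
--             continue
--         if ch.isspace():
--             pending_space = True
--             i += 1
--             continue
--         if ch == ",":
--             if out and out[-1] == " ":
--                 out.pop()
--             out.append(",")
--             pending_space = False
--             i += 1
--             continue
--         if pending_space and out:
--             out.append(" ")
--         pending_space = False
--         out.append(ch)
--         i += 1
--     return "".join(out).strip()
-- ===== SOURCE B (Python) =====
-- def _tokenize(text):
--     """Split text into an ordered list of tokens: quoted strings (with ''
--     escapes, possibly unterminated), single commas, whitespace runs, and
--     runs of other characters."""
--     toks = []
--     i, n = 0, len(text)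
--     while i < n:
--         c = text[i]
--         if c == "'":
--             j = i + 1
--             while j < n:
--                 if text[j] == "'":
--                     if j + 1 < n and text[j + 1] == "'":
--                         j += 2
--                         continue
--                     j += 1
--                     break
--                 j += 1
--             toks.append(text[i:j])
--             i = j
--         elif c == ',':
--             toks.append(',')
--             i += 1
--         elif c.isspace():
--             j = i + 1
--             while j < n and text[j].isspace():
--                 j += 1
--             toks.append(text[i:j])
--             i = j
--         else:
--             j = i + 1
--             while j < n and text[j] != "'" and text[j] != ',' and not text[j].isspace():
--                 j += 1
--             toks.append(text[i:j])
--             i = j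
--     return toks
--
--
-- def _normalize_operands(text: str) -> str:
--     parts = []
--     pending = False
--     for tok in _tokenize(text):
--         c = tok[0]
--         if c == ',':
--             parts.append(',')
--             pending = False
--         elif c.isspace():
--             pending = True
--         elif c == "'":
--             parts.append(tok)
--             # a pending space is neither emitted nor cleared by a quote
--         else:
--             if pending and parts:
--                 parts.append(' ')
--             parts.append(tok)
--             pending = False
--     return ''.join(parts).strip()
-- ===== Notes on version B (the rewrite author's own statement) =====
-- stated objective: alternative
-- what changed: Replaces A's char-by-char state machine (in_quote/pending_space flags updated per character) with a tokenize-then-reassemble pass: the text is first split into quoted-string, comma, whitespace-run and word-run tokens, then the output is rebuilt token by token.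
import Mathlib
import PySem

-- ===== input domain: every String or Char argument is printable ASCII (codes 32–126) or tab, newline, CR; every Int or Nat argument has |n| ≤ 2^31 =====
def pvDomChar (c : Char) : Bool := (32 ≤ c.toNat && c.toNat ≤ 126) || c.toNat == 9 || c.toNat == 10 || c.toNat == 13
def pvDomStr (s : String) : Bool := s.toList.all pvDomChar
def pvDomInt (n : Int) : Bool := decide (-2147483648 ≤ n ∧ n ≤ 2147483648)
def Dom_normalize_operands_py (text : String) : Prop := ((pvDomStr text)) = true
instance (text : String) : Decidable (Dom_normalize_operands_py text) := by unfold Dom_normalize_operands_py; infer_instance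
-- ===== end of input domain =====

-- B replaces A's per-character in_quote/pending_space automaton by a tokenize-then-reassemble
-- pass (alternative decomposition, same cost); return values proved equal on all inputs.

-- ===== PORT A =====
-- A's `out` list of strings is ported as a list of char lists; `"".join(out)` is its flatten.
def pvAseg : List Char → List (List Char) → Bool → Bool → List (List Char)
  | [], out, _inq, _pend => out
  | c :: rest, out, inq, pend =>
    if c = '\'' then
      if inq ∧ rest.head? = some '\'' then
        pvAseg rest.tail (out ++ [['\'', '\'']]) inq pend
      else
        pvAseg rest (out ++ [[c]]) (!inq) pend
    else if inq then
      pvAseg rest (out ++ [[c]]) inq pend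
    else if PySem.Chars.isspace c then
      pvAseg rest out inq true
    else if c = ',' then
      pvAseg rest ((if out ≠ [] ∧ out.getLast? = some [' '] then out.dropLast else out) ++ [[',']]) inq false
    else
      pvAseg rest ((if pend ∧ out ≠ [] then out ++ [[' ']] else out) ++ [[c]]) inq false
termination_by l _ _ _ => l.length
decreasing_by all_goals simp [List.length_tail] <;> omega

def normalize_operands_py (text : String) : String :=
  if text == "" then ""
  else String.mk (PySem.Chars.strip (pvAseg text.toList [] false false).flatten)

-- ===== PORT B =====
-- scan the body of a quoted token (after the opening quote): returns (token tail incl. closing quote, rest)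
def pvQuoteEnd : List Char → (List Char × List Char)
  | [] => ([], [])
  | c :: rest =>
    if c = '\'' then
      match rest with
      | c2 :: rest2 =>
        if c2 = '\'' then
          ('\'' :: '\'' :: (pvQuoteEnd rest2).1, (pvQuoteEnd rest2).2)
        else (['\''], rest)
      | [] => (['\''], [])
    else
      (c :: (pvQuoteEnd rest).1, (pvQuoteEnd rest).2)

def pvTakeWs : List Char → (List Char × List Char)
  | [] => ([], [])
  | c :: rest =>
    if PySem.Chars.isspace c then
      (c :: (pvTakeWs rest).1, (pvTakeWs rest).2)
    else ([], c :: rest)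

def pvTakeWord : List Char → (List Char × List Char)
  | [] => ([], [])
  | c :: rest =>
    if c ≠ '\'' ∧ c ≠ ',' ∧ ¬ (PySem.Chars.isspace c = true) then
      (c :: (pvTakeWord rest).1, (pvTakeWord rest).2)
    else ([], c :: rest)

theorem pvQuoteEnd_len : ∀ l : List Char, (pvQuoteEnd l).2.length ≤ l.length := by
  intro l
  induction l using pvQuoteEnd.induct with
  | case1 => simp [pvQuoteEnd]
  | case2 rest2 ih => rw [pvQuoteEnd.eq_def]; simp; omega
  | case3 c2 rest2 h => rw [pvQuoteEnd.eq_def]; simp [h]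
  | case4 => rw [pvQuoteEnd.eq_def]; simp
  | case5 c rest h ih => rw [pvQuoteEnd.eq_def]; simp [h]; omega

theorem pvTakeWs_len : ∀ l : List Char, (pvTakeWs l).2.length ≤ l.length := by
  intro l
  induction l using pvTakeWs.induct with
  | case1 => simp [pvTakeWs]
  | case2 c rest h ih => rw [pvTakeWs.eq_def]; simp [h]; omega
  | case3 c rest h => rw [pvTakeWs.eq_def]; simp [h]

theorem pvTakeWord_len : ∀ l : List Char, (pvTakeWord l).2.length ≤ l.length := by
  intro l
  induction l using pvTakeWord.induct with
  | case1 => simp [pvTakeWord]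
  | case2 c rest h ih => rw [pvTakeWord.eq_def]; simp [h]; omega
  | case3 c rest h => rw [pvTakeWord.eq_def]; simp only [if_neg h]; simp

def pvTokenize : List Char → List (List Char)
  | [] => []
  | c :: rest =>
    if c = '\'' then
      ('\'' :: (pvQuoteEnd rest).1) :: pvTokenize (pvQuoteEnd rest).2
    else if c = ',' then
      [','] :: pvTokenize rest
    else if PySem.Chars.isspace c then
      (c :: (pvTakeWs rest).1) :: pvTokenize (pvTakeWs rest).2
    else
      (c :: (pvTakeWord rest).1) :: pvTokenize (pvTakeWord rest).2
termination_by l => l.length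
decreasing_by
  · have := pvQuoteEnd_len rest; simp; omega
  · simp
  · have := pvTakeWs_len rest; simp; omega
  · have := pvTakeWord_len rest; simp; omega

def pvAssemble : List (List Char) → List (List Char) → Bool → List (List Char)
  | [], parts, _pending => parts
  | tok :: toks, parts, pending =>
    match tok with
    | [] => pvAssemble toks parts pending   -- tokens are never empty
    | c :: _ =>
      if c = ',' then pvAssemble toks (parts ++ [[',']]) false
      else if PySem.Chars.isspace c then pvAssemble toks parts true
      else if c = '\'' then pvAssemble toks (parts ++ [tok]) pending
      else pvAssemble toks ((if pending ∧ parts ≠ [] then parts ++ [[' ']] else parts) ++ [tok]) false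

def normalize_operands_py_alt (text : String) : String :=
  String.mk (PySem.Chars.strip (pvAssemble (pvTokenize text.toList) [] false).flatten)

-- ===== PRECONDITION & SPEC =====
def Spec_normalize_operands_py (text : String) (out : String) : Prop := out = normalize_operands_py_alt text
instance (text : String) (out : String) : Decidable (Spec_normalize_operands_py text out) := by unfold Spec_normalize_operands_py; infer_instance

-- ===== CLAIM (what is proved, stated in full; the proofs are below) =====
def Claim_equal_normalize_operands_py : Prop := ∀ (text : String), Dom_normalize_operands_py text → Spec_normalize_operands_py text (normalize_operands_py text)

-- ===== LEMMAS AND PROOFS =====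

-- branch rewrites for pvAseg
theorem pvAseg_nil (out : List (List Char)) (inq pend : Bool) : pvAseg [] out inq pend = out := by rw [pvAseg.eq_def]

theorem pvAseg_quote_esc (rest2 : List Char) (out : List (List Char)) (pend : Bool) :
    pvAseg ('\'' :: '\'' :: rest2) out true pend = pvAseg rest2 (out ++ [['\'', '\'']]) true pend := by
  rw [pvAseg.eq_def]; simp

theorem pvAseg_quote_open (rest : List Char) (out : List (List Char)) (pend : Bool) :
    pvAseg ('\'' :: rest) out false pend = pvAseg rest (out ++ [['\'']]) true pend := by
  rw [pvAseg.eq_def]; simp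

theorem pvAseg_quote_close (c2 : Char) (rest2 : List Char) (out : List (List Char)) (pend : Bool)
    (h : ¬ c2 = '\'') :
    pvAseg ('\'' :: c2 :: rest2) out true pend = pvAseg (c2 :: rest2) (out ++ [['\'']]) false pend := by
  rw [pvAseg.eq_def]; simp [h]

theorem pvAseg_quote_end (out : List (List Char)) (pend : Bool) :
    pvAseg ['\''] out true pend = out ++ [['\'']] := by
  rw [pvAseg.eq_def]; simp [pvAseg_nil]

theorem pvAseg_inq (c : Char) (rest : List Char) (out : List (List Char)) (pend : Bool)
    (h : ¬ c = '\'') :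
    pvAseg (c :: rest) out true pend = pvAseg rest (out ++ [[c]]) true pend := by
  rw [pvAseg.eq_def]; simp [h]

theorem pvAseg_space (c : Char) (rest : List Char) (out : List (List Char)) (pend : Bool)
    (h : ¬ c = '\'') (hs : PySem.Chars.isspace c = true) :
    pvAseg (c :: rest) out false pend = pvAseg rest out false true := by
  rw [pvAseg.eq_def]; simp [h, hs]

theorem pvAseg_comma (rest : List Char) (out : List (List Char)) (pend : Bool) :
    pvAseg (',' :: rest) out false pend =
      pvAseg rest ((if out ≠ [] ∧ out.getLast? = some [' '] then out.dropLast else out) ++ [[',']]) false false := by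
  rw [pvAseg.eq_def]; simp [PySem.Chars.isspace]

theorem pvAseg_word_step (c : Char) (rest : List Char) (out : List (List Char)) (pend : Bool)
    (hq : ¬ c = '\'') (hc : ¬ c = ',') (hs : PySem.Chars.isspace c = false) :
    pvAseg (c :: rest) out false pend =
      pvAseg rest ((if pend ∧ out ≠ [] then out ++ [[' ']] else out) ++ [[c]]) false false := by
  rw [pvAseg.eq_def]; simp [hq, hc, hs]

-- branch rewrites for pvQuoteEnd / pvTokenize / pvAssemble
theorem pvQuoteEnd_nil : pvQuoteEnd [] = ([], []) := by rw [pvQuoteEnd.eq_def]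

theorem pvQuoteEnd_esc (rest2 : List Char) :
    pvQuoteEnd ('\'' :: '\'' :: rest2) = ('\'' :: '\'' :: (pvQuoteEnd rest2).1, (pvQuoteEnd rest2).2) := by
  rw [pvQuoteEnd.eq_def]; simp

theorem pvQuoteEnd_close (c2 : Char) (rest2 : List Char) (h : ¬ c2 = '\'') :
    pvQuoteEnd ('\'' :: c2 :: rest2) = (['\''], c2 :: rest2) := by
  rw [pvQuoteEnd.eq_def]; simp [h]

theorem pvQuoteEnd_single : pvQuoteEnd ['\''] = (['\''], []) := by
  rw [pvQuoteEnd.eq_def]; simp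

theorem pvQuoteEnd_other (c : Char) (rest : List Char) (h : ¬ c = '\'') :
    pvQuoteEnd (c :: rest) = (c :: (pvQuoteEnd rest).1, (pvQuoteEnd rest).2) := by
  rw [pvQuoteEnd.eq_def]; simp [h]

theorem pvTokenize_nil : pvTokenize [] = [] := by rw [pvTokenize.eq_def]

theorem pvTokenize_quote (rest : List Char) :
    pvTokenize ('\'' :: rest) = ('\'' :: (pvQuoteEnd rest).1) :: pvTokenize (pvQuoteEnd rest).2 := by
  rw [pvTokenize.eq_def]; simp

theorem pvTokenize_comma (rest : List Char) :
    pvTokenize (',' :: rest) = [','] :: pvTokenize rest := by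
  rw [pvTokenize.eq_def]; simp [PySem.Chars.isspace]

theorem pvTokenize_ws (c : Char) (rest : List Char) (h : ¬ c = '\'') (hs : PySem.Chars.isspace c = true) :
    pvTokenize (c :: rest) = (c :: (pvTakeWs rest).1) :: pvTokenize (pvTakeWs rest).2 := by
  have hc : ¬ c = ',' := by rintro rfl; simp [PySem.Chars.isspace] at hs
  rw [pvTokenize.eq_def]; simp [h, hc, hs]

theorem pvTokenize_word (c : Char) (rest : List Char) (hq : ¬ c = '\'') (hc : ¬ c = ',')
    (hs : PySem.Chars.isspace c = false) :
    pvTokenize (c :: rest) = (c :: (pvTakeWord rest).1) :: pvTokenize (pvTakeWord rest).2 := by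
  rw [pvTokenize.eq_def]; simp [hq, hc, hs]

theorem pvAssemble_nil (parts : List (List Char)) (pending : Bool) :
    pvAssemble [] parts pending = parts := by rw [pvAssemble.eq_def]

theorem pvAssemble_comma (toks parts : List (List Char)) (pending : Bool) :
    pvAssemble ([','] :: toks) parts pending = pvAssemble toks (parts ++ [[',']]) false := by
  rw [pvAssemble.eq_def]; simp

theorem pvAssemble_ws (c : Char) (t : List Char) (toks parts : List (List Char)) (pending : Bool)
    (hs : PySem.Chars.isspace c = true) :
    pvAssemble ((c :: t) :: toks) parts pending = pvAssemble toks parts true := by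
  have hc : ¬ c = ',' := by rintro rfl; simp [PySem.Chars.isspace] at hs
  rw [pvAssemble.eq_def]; simp [hc, hs]

theorem pvAssemble_quote (t : List Char) (toks parts : List (List Char)) (pending : Bool) :
    pvAssemble (('\'' :: t) :: toks) parts pending = pvAssemble toks (parts ++ [('\'' :: t)]) pending := by
  rw [pvAssemble.eq_def]; simp [PySem.Chars.isspace]

theorem pvAssemble_word (c : Char) (t : List Char) (toks parts : List (List Char)) (pending : Bool)
    (hq : ¬ c = '\'') (hc : ¬ c = ',') (hs : PySem.Chars.isspace c = false) :
    pvAssemble ((c :: t) :: toks) parts pending =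
      pvAssemble toks ((if pending ∧ parts ≠ [] then parts ++ [[' ']] else parts) ++ [c :: t]) false := by
  rw [pvAssemble.eq_def]; simp [hq, hc, hs]

-- A's per-char output inside a quote, matching pvQuoteEnd's traversal
def pvSegs : List Char → List (List Char)
  | [] => []
  | c :: rest =>
    if c = '\'' then
      match rest with
      | c2 :: rest2 =>
        if c2 = '\'' then ['\'', '\''] :: pvSegs rest2
        else [['\'']]
      | [] => [['\'']]
    else [c] :: pvSegs rest

theorem pvSegs_nil : pvSegs [] = [] := by rw [pvSegs.eq_def]
theorem pvSegs_esc (rest2 : List Char) : pvSegs ('\'' :: '\'' :: rest2) = ['\'', '\''] :: pvSegs rest2 := by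
  rw [pvSegs.eq_def]; simp
theorem pvSegs_close (c2 : Char) (rest2 : List Char) (h : ¬ c2 = '\'') :
    pvSegs ('\'' :: c2 :: rest2) = [['\'']] := by
  rw [pvSegs.eq_def]; simp [h]
theorem pvSegs_single : pvSegs ['\''] = [['\'']] := by rw [pvSegs.eq_def]; simp
theorem pvSegs_other (c : Char) (rest : List Char) (h : ¬ c = '\'') :
    pvSegs (c :: rest) = [c] :: pvSegs rest := by
  rw [pvSegs.eq_def]; simp [h]

theorem pvSegs_flatten : ∀ l : List Char, (pvSegs l).flatten = (pvQuoteEnd l).1 := by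
  intro l
  induction l using pvQuoteEnd.induct with
  | case1 => simp [pvSegs_nil, pvQuoteEnd_nil]
  | case2 rest2 ih => simp [pvSegs_esc, pvQuoteEnd_esc, ih]
  | case3 c2 rest2 h => simp [pvSegs_close _ _ h, pvQuoteEnd_close _ _ h]
  | case4 => simp [pvSegs_single, pvQuoteEnd_single]
  | case5 c rest h ih => simp [pvSegs_other _ _ h, pvQuoteEnd_other _ _ h, ih]

theorem pvSegs_ne_nil : ∀ l : List Char, ∀ x ∈ pvSegs l, x ≠ [] := by
  intro l
  induction l using pvQuoteEnd.induct with
  | case1 => simp [pvSegs_nil]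
  | case2 rest2 ih => simp_all [pvSegs_esc]
  | case3 c2 rest2 h => simp [pvSegs_close _ _ h]
  | case4 => simp [pvSegs_single]
  | case5 c rest h ih => simp_all [pvSegs_other _ _ h]

theorem pvLastAppend (xs ys : List (List Char)) (h : ys ≠ []) :
    (xs ++ ys).getLast? = ys.getLast? := by
  induction xs with
  | nil => rfl
  | cons a xs ih =>
    obtain ⟨b, l', e⟩ := List.exists_cons_of_ne_nil (show xs ++ ys ≠ [] by simp [h])
    rw [List.cons_append, e, List.getLast?_cons_cons, ← e, ih]

theorem pvLastCons (a : List Char) (ys : List (List Char)) (h : ys ≠ []) :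
    (a :: ys).getLast? = ys.getLast? := by
  obtain ⟨b, l', e⟩ := List.exists_cons_of_ne_nil h
  rw [e, List.getLast?_cons_cons, ← e]

theorem pvSegs_last : ∀ l : List Char, (pvQuoteEnd l).2 ≠ [] →
    (pvSegs l).getLast? = some ['\''] := by
  intro l
  induction l using pvQuoteEnd.induct with
  | case1 => simp [pvQuoteEnd_nil]
  | case2 rest2 ih =>
    intro h
    rw [pvQuoteEnd_esc] at h
    have := ih h
    have hne : pvSegs rest2 ≠ [] := by intro hx; rw [hx] at this; simp at this
    rw [pvSegs_esc, pvLastCons _ _ hne]; exact this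
  | case3 c2 rest2 h => intro _; simp [pvSegs_close _ _ h]
  | case4 => simp [pvQuoteEnd_single]
  | case5 c rest h ih =>
    intro hx
    rw [pvQuoteEnd_other _ _ h] at hx
    have := ih hx
    have hne : pvSegs rest ≠ [] := by intro hy; rw [hy] at this; simp at this
    rw [pvSegs_other _ _ h, pvLastCons _ _ hne]; exact this

theorem pvAseg_inQuote : ∀ (l : List Char) (out : List (List Char)) (pend : Bool),
    pvAseg l out true pend = pvAseg (pvQuoteEnd l).2 (out ++ pvSegs l) false pend := by
  intro l
  induction l using pvQuoteEnd.induct with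
  | case1 => intro out pend; simp [pvAseg_nil, pvQuoteEnd_nil, pvSegs_nil]
  | case2 rest2 ih =>
    intro out pend
    rw [pvAseg_quote_esc, ih, pvQuoteEnd_esc, pvSegs_esc]
    simp
  | case3 c2 rest2 h =>
    intro out pend
    rw [pvAseg_quote_close _ _ _ _ h, pvQuoteEnd_close _ _ h, pvSegs_close _ _ h]
  | case4 =>
    intro out pend
    rw [pvAseg_quote_end, pvQuoteEnd_single, pvSegs_single, pvAseg_nil]
  | case5 c rest h ih =>
    intro out pend
    rw [pvAseg_inq _ _ _ _ h, ih, pvQuoteEnd_other _ _ h, pvSegs_other _ _ h]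
    simp

theorem pvAseg_wsRun : ∀ (t r : List Char) (out : List (List Char)),
    (∀ c ∈ t, PySem.Chars.isspace c = true) →
    pvAseg (t ++ r) out false true = pvAseg r out false true := by
  intro t
  induction t with
  | nil => intro r out _; simp
  | cons c t ih =>
    intro r out h
    have hsp : PySem.Chars.isspace c = true := h c (by simp)
    have hq : ¬ c = '\'' := by rintro rfl; simp [PySem.Chars.isspace] at hsp
    rw [List.cons_append, pvAseg_space _ _ _ _ hq hsp]
    exact ih r out (fun c hc => h c (by simp [hc]))

theorem pvAseg_wordRun : ∀ (t r : List Char) (out : List (List Char)),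
    (∀ c ∈ t, ¬ c = '\'' ∧ ¬ c = ',' ∧ PySem.Chars.isspace c = false) →
    pvAseg (t ++ r) out false false = pvAseg r (out ++ t.map (fun c => [c])) false false := by
  intro t
  induction t with
  | nil => intro r out _; simp
  | cons c t ih =>
    intro r out h
    obtain ⟨h1, h2, h3⟩ := h c (by simp)
    rw [List.cons_append, pvAseg_word_step _ _ _ _ h1 h2 h3, if_neg (by simp)]
    rw [ih r _ (fun c hc => h c (by simp [hc]))]
    simp

theorem pvTakeWs_spec : ∀ l : List Char,
    (∀ c ∈ (pvTakeWs l).1, PySem.Chars.isspace c = true) ∧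
    (pvTakeWs l).1 ++ (pvTakeWs l).2 = l := by
  intro l
  induction l using pvTakeWs.induct with
  | case1 => simp [pvTakeWs]
  | case2 c rest h ih =>
    have e : pvTakeWs (c :: rest) = (c :: (pvTakeWs rest).1, (pvTakeWs rest).2) := by
      rw [pvTakeWs.eq_def]; simp [h]
    rw [e]
    refine ⟨?_, by simp [ih.2]⟩
    intro x hx
    rcases List.mem_cons.mp hx with rfl | hx
    · exact h
    · exact ih.1 x hx
  | case3 c rest h => rw [pvTakeWs.eq_def]; simp [h]

theorem pvTakeWord_spec : ∀ l : List Char,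
    (∀ c ∈ (pvTakeWord l).1, ¬ c = '\'' ∧ ¬ c = ',' ∧ PySem.Chars.isspace c = false) ∧
    (pvTakeWord l).1 ++ (pvTakeWord l).2 = l := by
  intro l
  induction l using pvTakeWord.induct with
  | case1 => simp [pvTakeWord]
  | case2 c rest h ih =>
    have e : pvTakeWord (c :: rest) = (c :: (pvTakeWord rest).1, (pvTakeWord rest).2) := by
      rw [pvTakeWord.eq_def]; simp [h]
    rw [e]
    refine ⟨?_, by simp [ih.2]⟩
    intro x hx
    rcases List.mem_cons.mp hx with rfl | hx
    · refine ⟨h.1, h.2.1, ?_⟩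
      cases hb : PySem.Chars.isspace x
      · rfl
      · exact absurd hb h.2.2
    · exact ih.1 x hx
  | case3 c rest h => rw [pvTakeWord.eq_def]; simp only [if_neg h]; simp

theorem pvFlatten_nil_iff (l : List (List Char)) (h : ∀ x ∈ l, x ≠ []) :
    l.flatten = [] ↔ l = [] := by
  cases l with
  | nil => simp
  | cons a t =>
    simp only [List.flatten_cons, List.append_eq_nil_iff]
    constructor
    · rintro ⟨ha, -⟩; exact absurd ha (h a (by simp))
    · intro hx; simp at hx

theorem pvFlatten_singles : ∀ t : List Char, (t.map (fun c => [c])).flatten = t := by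
  intro t; induction t <;> simp_all

theorem pvLast_singles : ∀ (t : List Char) (c : Char) (xs : List (List Char)),
    ∃ ch, ch ∈ c :: t ∧ ((xs ++ [[c]]) ++ t.map (fun c' => [c'])).getLast? = some [ch] := by
  intro t
  induction t with
  | nil => intro c xs; exact ⟨c, by simp⟩
  | cons c' t ih =>
    intro c xs
    obtain ⟨ch, hch, hlast⟩ := ih c' (xs ++ [[c]])
    refine ⟨ch, by simpa using Or.inr hch, ?_⟩
    rw [← hlast]
    congr 1
    simp

theorem pvMain : ∀ (n : Nat) (cs : List Char), cs.length ≤ n →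
    ∀ (out parts : List (List Char)) (pend : Bool),
    out.flatten = parts.flatten →
    (∀ x ∈ out, x ≠ []) → (∀ x ∈ parts, x ≠ []) →
    out.getLast? ≠ some [' '] →
    (pvAseg cs out false pend).flatten = (pvAssemble (pvTokenize cs) parts pend).flatten := by
  intro n
  induction n with
  | zero =>
    intro cs hlen out parts pend hflat _ _ _
    have : cs = [] := by cases cs <;> simp_all
    subst this
    simp [pvAseg_nil, pvTokenize_nil, pvAssemble_nil, hflat]
  | succ n ih =>
    intro cs hlen out parts pend hflat hout hparts hlast
    cases cs with
    | nil => simp [pvAseg_nil, pvTokenize_nil, pvAssemble_nil, hflat]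
    | cons c rest =>
      simp only [List.length_cons, Nat.add_le_add_iff_right] at hlen
      by_cases hq : c = '\''
      · subst hq
        rw [pvAseg_quote_open, pvAseg_inQuote, pvTokenize_quote, pvAssemble_quote]
        by_cases hr : (pvQuoteEnd rest).2 = []
        · rw [hr, pvAseg_nil, pvTokenize_nil, pvAssemble_nil]
          simp [hflat, pvSegs_flatten]
        · have hlast' : (pvSegs rest).getLast? = some ['\''] := pvSegs_last rest hr
          have hnn : pvSegs rest ≠ [] := by intro hx; rw [hx] at hlast'; simp at hlast'
          refine ih _ (le_trans (pvQuoteEnd_len rest) hlen) _ _ _ ?_ ?_ ?_ ?_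
          · simp [hflat, pvSegs_flatten]
          · intro x hx
            simp only [List.mem_append, List.mem_singleton] at hx
            rcases hx with (hx | rfl) | hx
            · exact hout x hx
            · simp
            · exact pvSegs_ne_nil rest x hx
          · intro x hx
            simp only [List.mem_append, List.mem_singleton] at hx
            rcases hx with hx | rfl
            · exact hparts x hx
            · simp
          · rw [pvLastAppend _ _ hnn, hlast']
            simp
      · by_cases hc : c = ','
        · subst hc
          rw [pvAseg_comma, pvTokenize_comma, pvAssemble_comma]
          have hpop : ¬ (out ≠ [] ∧ out.getLast? = some [' ']) := by
            rintro ⟨-, h2⟩; exact hlast h2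
          rw [if_neg hpop]
          refine ih _ hlen _ _ _ ?_ ?_ ?_ ?_
          · simp [hflat]
          · intro x hx
            simp only [List.mem_append, List.mem_singleton] at hx
            rcases hx with hx | rfl
            · exact hout x hx
            · simp
          · intro x hx
            simp only [List.mem_append, List.mem_singleton] at hx
            rcases hx with hx | rfl
            · exact hparts x hx
            · simp
          · rw [pvLastAppend _ _ (by simp)]
            simp
        · by_cases hs : PySem.Chars.isspace c = true
          · rw [pvAseg_space _ _ _ _ hq hs, pvTokenize_ws _ _ hq hs,
              pvAssemble_ws _ _ _ _ _ hs]
            have hsplit := (pvTakeWs_spec rest).2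
            calc (pvAseg rest out false true).flatten
                = (pvAseg ((pvTakeWs rest).1 ++ (pvTakeWs rest).2) out false true).flatten := by rw [hsplit]
              _ = (pvAseg (pvTakeWs rest).2 out false true).flatten := by
                  rw [pvAseg_wsRun _ _ _ (pvTakeWs_spec rest).1]
              _ = (pvAssemble (pvTokenize (pvTakeWs rest).2) parts true).flatten := by
                  exact ih _ (le_trans (pvTakeWs_len rest) hlen) _ _ _ hflat hout hparts hlast
          · have hs' : PySem.Chars.isspace c = false := by
              cases hx : PySem.Chars.isspace c
              · rfl
              · exact absurd hx hs
            rw [pvAseg_word_step _ _ _ _ hq hc hs', pvTokenize_word _ _ hq hc hs',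
              pvAssemble_word _ _ _ _ _ hq hc hs']
            have hiff : (out = []) ↔ (parts = []) := by
              rw [← pvFlatten_nil_iff out hout, ← pvFlatten_nil_iff parts hparts, hflat]
            have hsplit := (pvTakeWord_spec rest).2
            have hword := (pvTakeWord_spec rest).1
            have hA : pvAseg rest ((if pend ∧ out ≠ [] then out ++ [[' ']] else out) ++ [[c]]) false false
                = pvAseg (pvTakeWord rest).2
                    (((if pend ∧ out ≠ [] then out ++ [[' ']] else out) ++ [[c]]) ++ (pvTakeWord rest).1.map (fun c => [c])) false false := by
              conv_lhs => rw [← hsplit]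
              exact pvAseg_wordRun (pvTakeWord rest).1 (pvTakeWord rest).2 _ hword
            rw [hA]
            obtain ⟨ch, hch, hlastch⟩ :=
              pvLast_singles (pvTakeWord rest).1 c (if pend ∧ out ≠ [] then out ++ [[' ']] else out)
            have hchw : ¬ ch = ' ' := by
              rcases List.mem_cons.mp hch with h' | h'
              · subst h'; intro he; subst he; simp [PySem.Chars.isspace] at hs'
              · have hws := (hword ch h').2.2
                intro he; subst he; simp [PySem.Chars.isspace] at hws
            refine ih _ (le_trans (pvTakeWord_len rest) hlen) _ _ _ ?_ ?_ ?_ ?_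
            · by_cases hp : pend = true ∧ out ≠ []
              · have hp' : pend = true ∧ parts ≠ [] := ⟨hp.1, fun hx => hp.2 (hiff.mpr hx)⟩
                simp only [if_pos hp, if_pos hp']
                simp [hflat, pvFlatten_singles]
              · have hp' : ¬ (pend = true ∧ parts ≠ []) := by
                  rintro ⟨h1, h2⟩; exact hp ⟨h1, fun hx => h2 (hiff.mp hx)⟩
                simp only [if_neg hp, if_neg hp']
                simp [hflat, pvFlatten_singles]
            · intro x hx
              simp only [List.mem_append, List.mem_singleton, List.mem_map] at hx
              rcases hx with (hx | rfl) | ⟨a, -, rfl⟩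
              · split at hx
                · simp only [List.mem_append, List.mem_singleton] at hx
                  rcases hx with hx | rfl
                  · exact hout x hx
                  · simp
                · exact hout x hx
              · simp
              · simp
            · intro x hx
              simp only [List.mem_append, List.mem_singleton] at hx
              rcases hx with hx | rfl
              · split at hx
                · simp only [List.mem_append, List.mem_singleton] at hx
                  rcases hx with hx | rfl
                  · exact hparts x hx
                  · simp
                · exact hparts x hx
              · simp
            · rw [hlastch]
              simp [hchw]

-- ===== VERDICT (by name: the statement is the Claim_ definition above) =====
theorem normalize_operands_py_spec : Claim_equal_normalize_operands_py := by
  intro text _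
  unfold Spec_normalize_operands_py normalize_operands_py normalize_operands_py_alt
  by_cases h : text = ""
  · subst h
    rw [if_pos (show (("" : String) == "") = true from rfl)]
    have h0 : ("" : String).toList = [] := rfl
    rw [h0, pvTokenize_nil, pvAssemble_nil]
    rfl
  · have hne : (text == "") = false := by simp [h]
    rw [hne]
    simp only [Bool.false_eq_true, if_false]
    rw [pvMain text.toList.length text.toList le_rfl [] [] false rfl
      (by simp) (by simp) (by simp)]
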